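-- pv_equiv track=rewrite | github.com/isabelkim/MI-IRL-KP | limiirl.py | format_traj
-- ===== SOURCE A (Python) =====
-- def format_traj(trajectories):
--     lst = []
--     for traj in trajectories:
--         row = []
--         n = len(traj)
--         for i in range(0, n-2, 2):
--             row.append((traj[i], traj[i+1], traj[i+2]))
--
--         lst.append(row)
--
--     return lst
-- ===== SOURCE B (Python) =====
-- def format_traj(trajectories):
--     return [list(zip(traj[0::2], traj[1::2], traj[2::2])) for traj in trajectories]
-- ===== Notes on version B (the rewrite author's own statement) =====
-- stated objective: idiomatic
-- what changed: replaces the index loop over range(0, n-2, 2) with zipping three stride-2 slices traj[0::2], traj[1::2], traj[2::2], whose zip truncation reproduces the triple count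
import Mathlib
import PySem

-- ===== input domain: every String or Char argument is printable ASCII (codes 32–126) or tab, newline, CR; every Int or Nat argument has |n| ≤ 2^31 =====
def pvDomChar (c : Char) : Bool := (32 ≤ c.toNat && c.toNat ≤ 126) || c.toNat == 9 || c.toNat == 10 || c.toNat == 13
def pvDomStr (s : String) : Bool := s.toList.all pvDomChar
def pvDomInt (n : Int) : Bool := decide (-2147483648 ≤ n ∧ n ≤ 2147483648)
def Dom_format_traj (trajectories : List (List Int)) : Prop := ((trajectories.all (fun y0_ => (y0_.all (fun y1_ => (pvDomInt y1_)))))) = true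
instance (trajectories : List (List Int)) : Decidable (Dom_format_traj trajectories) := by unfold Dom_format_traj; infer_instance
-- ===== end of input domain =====

-- B replaces A's index loop over range(0, n-2, 2) by zipping three stride-2 slices (idiomatic); return values proved equal.


-- ===== PORT A =====
-- literal port of A: outer append loop; inner loop 'for i in range(0, n-2, 2)' appending
-- (traj[i], traj[i+1], traj[i+2]); every index hit is in range, so pyGetD is exact here.
def format_traj (trajectories : List (List Int)) : List (List (Int × Int × Int)) :=
  trajectories.foldl (fun lst traj =>
    let n : Int := traj.length
    let row := (PySem.List.pyRange 0 (n - 2) 2).foldl (fun row i =>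
      row ++ [(PySem.List.pyGetD traj i 0, PySem.List.pyGetD traj (i + 1) 0,
               PySem.List.pyGetD traj (i + 2) 0)]) []
    lst ++ [row]) []

-- ===== PORT B =====
-- literal port of B: per trajectory, zip the three stride-2 slices traj[0::2], traj[1::2], traj[2::2]
def format_traj_alt (trajectories : List (List Int)) : List (List (Int × Int × Int)) :=
  trajectories.map (fun traj =>
    ((PySem.List.slice? traj (some 0) none 2).getD []).zip
      (((PySem.List.slice? traj (some 1) none 2).getD []).zip
        ((PySem.List.slice? traj (some 2) none 2).getD [])))

-- ===== PRECONDITION & SPEC =====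
def Spec_format_traj (trajectories : List (List Int)) (out : List (List (Int × Int × Int))) : Prop := out = format_traj_alt trajectories
instance (trajectories : List (List Int)) (out : List (List (Int × Int × Int))) : Decidable (Spec_format_traj trajectories out) := by unfold Spec_format_traj; infer_instance

-- ===== CLAIM (what is proved, stated in full; the proofs are below) =====
def Claim_equal_format_traj : Prop := ∀ (trajectories : List (List Int)), Dom_format_traj trajectories → Spec_format_traj trajectories (format_traj trajectories)

-- ===== LEMMAS AND PROOFS =====

theorem foldl_append_singleton {α β : Type} (f : α → β) :
    ∀ (l : List α) (acc : List β),
      l.foldl (fun r x => r ++ [f x]) acc = acc ++ l.map f := by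
  intro l
  induction l with
  | nil => simp
  | cons x t ih => intro acc; simp [List.foldl, ih]

theorem filterMap_eq_map_of_some {α β : Type} (f : α → Option β) (g : α → β) :
    ∀ (l : List α), (∀ a ∈ l, f a = some (g a)) → l.filterMap f = l.map g := by
  intro l
  induction l with
  | nil => simp
  | cons x t ih =>
    intro h
    simp [h x (by simp), ih (fun a ha => h a (by simp [ha]))]

-- range(0, m, 2) as a map over List.range
theorem pyRange_two_closed (m : Int) :
    PySem.List.pyRange 0 m 2 =
      (List.range ((m + 1) / 2).toNat).map (fun j : Nat => (2 * (j : Int))) := by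
  unfold PySem.List.pyRange
  norm_num
  by_cases h : 0 < m
  · have : m + 2 - 1 = m + 1 := by ring
    simp [h, this]
  · have h0 : ((m + 1) / 2).toNat = 0 := by omega
    simp [h, h0]

-- closed form for xs[k::2] (k small, nonneg) as a map over List.range
theorem slice2_closed (xs : List Int) (k : Nat) :
    (PySem.List.slice? xs (some (k : Int)) none 2).getD [] =
      (List.range (((xs.length : Int) - k + 1) / 2).toNat).map
        (fun j => xs.getD (k + 2 * j) 0) := by
  unfold PySem.List.slice? PySem.List.sliceIndices
  norm_num
  have hknn : ¬((k : Int) < 0) := by omega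
  simp only [hknn, if_false]
  by_cases h : k ≤ xs.length
  · have hmin : min (k : Int) (xs.length : Int) = (k : Int) := by omega
    rw [hmin]
    have hcount : (if (k : Int) < (xs.length : Int) then
        (((xs.length : Int) - k + 2 - 1) / 2).toNat else 0)
        = (((xs.length : Int) - k + 1) / 2).toNat := by
      split_ifs with hlt
      · congr 1; ring_nf
      · omega
    rw [hcount]
    apply filterMap_eq_map_of_some
    intro j hj
    rw [List.mem_range] at hj
    have hidx : ((k : Int) + 2 * (j : Int)).toNat = k + 2 * j := by omega
    have hlt : k + 2 * j < xs.length := by omega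
    rw [hidx, List.getElem?_eq_getElem hlt]
    simp
  · have hmin : min (k : Int) (xs.length : Int) = (xs.length : Int) := by omega
    rw [hmin]
    have h0 : (((xs.length : Int) - k + 1) / 2).toNat = 0 := by omega
    simp [h0]

theorem zip3_map_range {α β γ : Type} :
    ∀ (c2 : Nat) (f : Nat → α) (g : Nat → β) (h : Nat → γ) (c1 c0 : Nat), c2 ≤ c1 → c2 ≤ c0 →
      ((List.range c0).map f).zip (((List.range c1).map g).zip ((List.range c2).map h)) =
        (List.range c2).map (fun j => (f j, g j, h j)) := by
  intro c2
  induction c2 with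
  | zero => intro f g h c1 c0 _ _; simp
  | succ m ih =>
    intro f g h c1 c0 h1 h0
    obtain ⟨m1, rfl⟩ : ∃ m1, c1 = m1 + 1 := ⟨c1 - 1, by omega⟩
    obtain ⟨m0, rfl⟩ : ∃ m0, c0 = m0 + 1 := ⟨c0 - 1, by omega⟩
    simp only [List.range_succ_eq_map, List.map_cons, List.map_map, List.zip_cons_cons]
    congr 1
    rw [ih (f ∘ Nat.succ) (g ∘ Nat.succ) (h ∘ Nat.succ) m1 m0 (by omega) (by omega)]
    simp [Function.comp_def]

theorem row_eq (xs : List Int) :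
    (PySem.List.pyRange 0 ((xs.length : Int) - 2) 2).foldl (fun row i =>
      row ++ [(PySem.List.pyGetD xs i 0, PySem.List.pyGetD xs (i + 1) 0,
               PySem.List.pyGetD xs (i + 2) 0)]) [] =
    ((PySem.List.slice? xs (some 0) none 2).getD []).zip
      (((PySem.List.slice? xs (some 1) none 2).getD []).zip
        ((PySem.List.slice? xs (some 2) none 2).getD [])) := by
  rw [foldl_append_singleton
    (f := fun i => (PySem.List.pyGetD xs i 0, PySem.List.pyGetD xs (i + 1) 0,
                    PySem.List.pyGetD xs (i + 2) 0))]
  rw [pyRange_two_closed]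
  have h0 := slice2_closed xs 0
  have h1 := slice2_closed xs 1
  have h2 := slice2_closed xs 2
  push_cast at h0 h1 h2
  rw [h0, h1, h2]
  rw [zip3_map_range _ _ _ _ _ _ (by omega) (by omega)]
  rw [List.nil_append, List.map_map]
  apply List.map_congr_left
  intro j _
  have g0 : (2 * (j : Int)) = ((0 + 2 * j : Nat) : Int) := by push_cast; ring
  have g1 : ((0 + 2 * j : Nat) : Int) + 1 = ((1 + 2 * j : Nat) : Int) := by push_cast; ring
  have g2 : ((0 + 2 * j : Nat) : Int) + 2 = ((2 + 2 * j : Nat) : Int) := by push_cast; ring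
  simp only [Function.comp_apply, g0, g1, g2, PySem.List.pyGetD_natCast]

-- ===== VERDICT (by name: the statement is the Claim_ definition above) =====
theorem format_traj_spec : Claim_equal_format_traj := by
  intro ts _
  unfold Spec_format_traj format_traj format_traj_alt
  rw [foldl_append_singleton]
  simp only [List.nil_append]
  exact List.map_congr_left (fun traj _ => row_eq traj)
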